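-- pv_equiv track=rewrite | github.com/vinchinzu/euler | python/384.py | rudin_shapiro
-- ===== SOURCE A (Python) =====
-- def rudin_shapiro(n: int) -> int:
--     """Return b(n) = (-1)**a(n) for the Rudin-Shapiro sequence.
--
--     Here a(n) is the count of (possibly overlapping) adjacent pairs of 1-bits in the
--     binary representation of n.
--     """
--     if n < 0:
--         msg = "n must be non-negative for rudin_shapiro"
--         raise ValueError(msg)
--
--     if n == 0:
--         return 1
--
--     count_adjacent_ones = 0
--     prev_bit = 0
--
--     while n > 0:
--         curr_bit = n & 1
--         if prev_bit == 1 and curr_bit == 1: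
--             count_adjacent_ones += 1
--         prev_bit = curr_bit
--         n >>= 1
--
--     return 1 if count_adjacent_ones % 2 == 0 else -1
-- ===== SOURCE B (Python) =====
-- def rudin_shapiro(n: int) -> int:
--     """Return b(n) = (-1)**a(n) for the Rudin-Shapiro sequence.
--
--     Uses the standard recurrence: b(0)=1, b(2m)=b(m), and b(2m+1)=b(m)
--     negated exactly when m is odd (the new trailing 1 sits next to a 1).
--     """
--     if n < 0:
--         msg = "n must be non-negative for rudin_shapiro"
--         raise ValueError(msg)
--     if n == 0:
--         return 1
--     half = rudin_shapiro(n >> 1)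
--     return -half if n % 4 == 3 else half
-- ===== Notes on version B (the rewrite author's own statement) =====
-- stated objective: alternative
-- what changed: Replaces the iterative per-bit scan with prev_bit/curr_bit/count state by a direct recursion on the binary structure using the Rudin-Shapiro recurrence b(2m)=b(m), b(2m+1)=±b(m) (sign flipped exactly when m is odd, i.e. n % 4 == 3), so no pair-count is ever accumulated.
import Mathlib
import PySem

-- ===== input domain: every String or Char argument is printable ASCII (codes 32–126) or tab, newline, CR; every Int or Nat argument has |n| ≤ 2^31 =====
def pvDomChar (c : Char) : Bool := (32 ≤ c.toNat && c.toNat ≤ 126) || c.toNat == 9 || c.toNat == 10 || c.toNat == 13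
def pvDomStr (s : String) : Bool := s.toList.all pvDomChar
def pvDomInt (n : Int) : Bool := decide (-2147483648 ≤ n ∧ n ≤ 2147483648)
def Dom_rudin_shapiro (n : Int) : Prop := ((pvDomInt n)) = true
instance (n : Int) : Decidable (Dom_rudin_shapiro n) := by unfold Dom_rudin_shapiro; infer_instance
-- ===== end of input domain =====

-- B replaces A's stateful per-bit counting loop by a direct recursion on the binary
-- structure via the Rudin-Shapiro recurrence (sign flipped exactly when n % 4 == 3).

-- ===== PORT A =====
-- the while loop of A: state (n, prev_bit, count_adjacent_ones); n ≥ 0 here so we loop on Nat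
def rsLoop (m prev count : Nat) : Nat :=
  if h : 0 < m then
    let curr := m % 2
    rsLoop (m / 2) curr (if prev = 1 ∧ curr = 1 then count + 1 else count)
  else count
decreasing_by exact Nat.div_lt_self h (by norm_num)

def rudin_shapiro (n : Int) : Int :=
  if n < 0 then 0  -- Python raises ValueError here; excluded by Pre_rudin_shapiro
  else if n = 0 then 1
  else if rsLoop n.toNat 0 0 % 2 = 0 then 1 else -1

-- ===== PORT B =====
-- Source B's recursion: b(0)=1; b(n)=b(n>>1), negated exactly when n % 4 == 3
def rsRec (m : Nat) : Int :=
  if h : 0 < m then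
    let half := rsRec (m / 2)
    if m % 4 = 3 then -half else half
  else 1
decreasing_by exact Nat.div_lt_self h (by norm_num)

def rudin_shapiro_alt (n : Int) : Int :=
  if n < 0 then 0  -- Python raises ValueError here; excluded by Pre_rudin_shapiro
  else rsRec n.toNat

-- ===== PRECONDITION & SPEC =====
-- Pre_ excludes exactly n < 0, on which the Python A raises ValueError.
def Pre_rudin_shapiro (n : Int) : Prop := 0 ≤ n
instance (n : Int) : Decidable (Pre_rudin_shapiro n) := by unfold Pre_rudin_shapiro; infer_instance
def pvWitness_rudin_shapiro : Int := (5)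

def Spec_rudin_shapiro (n : Int) (out : Int) : Prop := out = rudin_shapiro_alt n
instance (n : Int) (out : Int) : Decidable (Spec_rudin_shapiro n out) := by unfold Spec_rudin_shapiro; infer_instance

-- ===== CLAIM (what is proved, stated in full; the proofs are below) =====
def Claim_equal_rudin_shapiro : Prop := ∀ (n : Int), Dom_rudin_shapiro n → Pre_rudin_shapiro n → Spec_rudin_shapiro n (rudin_shapiro n)

-- ===== LEMMAS AND PROOFS =====

-- proof-side helper: number of 1-bits (used only to characterise both ports)
def popcount (m : Nat) : Nat :=
  if h : 0 < m then m % 2 + popcount (m / 2) else 0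
decreasing_by exact Nat.div_lt_self h (by norm_num)

lemma popcount_step (k : Nat) : popcount k = k % 2 + popcount (k / 2) := by
  by_cases h : 0 < k
  · rw [popcount]; simp [h]
  · have hk : k = 0 := by omega
    subst hk
    simp [popcount]

lemma and_mod_two (a b : Nat) : (a &&& b) % 2 = if a % 2 = 1 ∧ b % 2 = 1 then 1 else 0 := by
  have h : (a &&& b) % 2 = a % 2 &&& b % 2 := by
    have := @Nat.and_mod_two_pow a b 1
    simpa using this
  rcases Nat.mod_two_eq_zero_or_one a with ha | ha <;>
    rcases Nat.mod_two_eq_zero_or_one b with hb | hb <;>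
      simp [h, ha, hb]

lemma popcount_and_shift (m : Nat) :
    popcount (m &&& m / 2) =
      popcount (m / 2 &&& m / 2 / 2) + (if m % 2 = 1 ∧ (m / 2) % 2 = 1 then 1 else 0) := by
  rw [popcount_step (m &&& m / 2), Nat.and_div_two, and_mod_two]
  omega

lemma rsLoop_eq (m : Nat) : ∀ prev c : Nat,
    rsLoop m prev c = c + popcount (m &&& m / 2) + (if prev = 1 ∧ m % 2 = 1 then 1 else 0) := by
  induction m using Nat.strong_induction_on with
  | _ m ih =>
    intro prev c
    by_cases h : 0 < m
    · rw [rsLoop]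
      simp only [h, dif_pos]
      rw [ih (m / 2) (Nat.div_lt_self h (by norm_num))]
      rw [popcount_and_shift m]
      split_ifs <;> omega
    · have hm : m = 0 := by omega
      subst hm
      rw [rsLoop]
      simp [popcount]

lemma mod4_iff (m : Nat) : m % 4 = 3 ↔ (m % 2 = 1 ∧ (m / 2) % 2 = 1) := by omega

lemma rsRec_eq (m : Nat) :
    rsRec m = if popcount (m &&& m / 2) % 2 = 0 then 1 else -1 := by
  induction m using Nat.strong_induction_on with
  | _ m ih =>
    by_cases h : 0 < m
    · rw [rsRec]
      simp only [h, dif_pos]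
      rw [ih (m / 2) (Nat.div_lt_self h (by norm_num)), popcount_and_shift m]
      by_cases h4 : m % 4 = 3
      · have := (mod4_iff m).mp h4
        simp only [h4, if_pos, this, and_self, if_true]
        split_ifs with h1 h2 h2 <;> first | rfl | omega
      · have hnot : ¬ (m % 2 = 1 ∧ (m / 2) % 2 = 1) := fun hc => h4 ((mod4_iff m).mpr hc)
        simp only [h4, if_false, hnot, if_neg, Nat.add_zero]
    · have hm : m = 0 := by omega
      subst hm
      rw [rsRec]
      simp [popcount]

-- ===== VERDICT (by name: the statement is the Claim_ definition above) =====
theorem rudin_shapiro_spec : Claim_equal_rudin_shapiro := by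
  intro n _ hpre
  unfold Spec_rudin_shapiro rudin_shapiro rudin_shapiro_alt Pre_rudin_shapiro at *
  have hn : ¬ n < 0 := by omega
  simp only [hn, if_false]
  by_cases h0 : n = 0
  · subst h0; simp [rsRec]
  · simp only [h0, if_false]
    rw [rsLoop_eq, rsRec_eq]
    simp
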